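-- pv_equiv track=rewrite | github.com/psukpras/INST326_2025_FALL_KINGS_CONNER | kings_corner.py | end_round
-- ===== SOURCE A (Python) =====
-- def end_round(playerturnhand):
--     """
--     Args: playerturnhand is a list of tuples displaying the amount of cards
--         that display the number and color of each card
--     """
--     score = 0
--     for num, color in playerturnhand:
--         if num == 13:
--             score += 10
--         else:
--             score += 1
--     return score
-- ===== SOURCE B (Python) =====
-- def end_round(playerturnhand):
--     counts = {}
--     for num, color in playerturnhand:
--         counts[num] = counts.get(num, 0) + 1
--     score = 0
--     for num, c in counts.items():
--         score += c * (10 if num == 13 else 1)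
--     return score
-- ===== Notes on version B (the rewrite author's own statement) =====
-- stated objective: alternative
-- what changed: Instead of a per-card branched accumulator, B builds a histogram (dict) of card numbers in one pass and then computes the score as a weighted sum over the distinct numbers (count * 10 for 13, count * 1 otherwise).
import Mathlib
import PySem

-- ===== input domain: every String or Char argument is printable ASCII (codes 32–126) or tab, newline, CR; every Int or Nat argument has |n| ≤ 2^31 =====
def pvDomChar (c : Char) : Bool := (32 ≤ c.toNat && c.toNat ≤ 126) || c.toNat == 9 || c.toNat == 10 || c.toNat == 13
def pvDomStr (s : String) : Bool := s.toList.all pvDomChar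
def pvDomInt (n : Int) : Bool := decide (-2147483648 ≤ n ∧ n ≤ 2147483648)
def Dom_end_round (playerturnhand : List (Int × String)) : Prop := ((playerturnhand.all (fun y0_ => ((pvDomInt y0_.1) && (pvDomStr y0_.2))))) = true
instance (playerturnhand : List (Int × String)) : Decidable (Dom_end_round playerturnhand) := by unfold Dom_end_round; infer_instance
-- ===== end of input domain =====

-- ===== PORT A =====
-- literal port of A: fold over the hand with a running score, branching per card
def end_round (playerturnhand : List (Int × String)) : Int :=
  playerturnhand.foldl (fun score c => if c.1 == 13 then score + 10 else score + 1) 0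

-- ===== PORT B =====
-- port of B: build a histogram dict of card numbers, then a weighted sum over its items
def end_round_alt (playerturnhand : List (Int × String)) : Int :=
  let counts : PySem.Dict Int Int :=
    playerturnhand.foldl (fun d c => d.insert c.1 (d.getD c.1 0 + 1)) PySem.Dict.empty
  counts.items.foldl (fun score kc => score + kc.2 * (if kc.1 == 13 then 10 else 1)) 0

-- ===== PRECONDITION & SPEC =====
def Spec_end_round (playerturnhand : List (Int × String)) (out : Int) : Prop := out = end_round_alt playerturnhand
instance (playerturnhand : List (Int × String)) (out : Int) : Decidable (Spec_end_round playerturnhand out) := by unfold Spec_end_round; infer_instance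

-- ===== CLAIM (what is proved, stated in full; the proofs are below) =====
def Claim_equal_end_round : Prop := ∀ (playerturnhand : List (Int × String)), Dom_end_round playerturnhand → Spec_end_round playerturnhand (end_round playerturnhand)

-- ===== LEMMAS AND PROOFS =====

-- ===== VERDICT (by name: the statement is the Claim_ definition above) =====
-- weight of one card number
lemma pv_counter_items (h : List (Int × String)) :
    (h.foldl (fun d c => d.insert c.1 (d.getD c.1 0 + 1)) PySem.Dict.empty).items
      = (PySem.Set.ofList (h.map Prod.fst)).map
          (fun k => (k, ((h.map Prod.fst).count k : Int))) := by
  rw [← List.foldl_map (f := Prod.fst)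
        (g := fun d k => PySem.Dict.insert d k (d.getD k 0 + 1)),
      PySem.Dict.foldl_insert_getD_add_one_eq_counter, PySem.Dict.items_counter]

-- sum over distinct keys weighted by multiplicity = sum over the list
lemma pv_sum_count (ks : List Int) (w : Int → Int) :
    ((PySem.Set.ofList ks).map (fun k => ((ks.count k : Int) * w k))).sum
      = (ks.map w).sum := by
  have hnd : (PySem.Set.ofList ks).Nodup := PySem.Set.nodup_ofList ks
  have hfin : (PySem.Set.ofList ks).toFinset = ks.toFinset := by
    ext x; simp [List.mem_toFinset, PySem.Set.mem_ofList]
  calc ((PySem.Set.ofList ks).map (fun k => ((ks.count k : Int) * w k))).sum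
      = ∑ x ∈ (PySem.Set.ofList ks).toFinset, (ks.count x : Int) * w x := by
        rw [List.sum_toFinset _ hnd]
    _ = ∑ x ∈ ks.toFinset, ks.count x • w x := by
        rw [hfin]; exact Finset.sum_congr rfl (fun x _ => by
          simp)
    _ = (ks.map w).sum := by
        simpa using (Finset.sum_multiset_map_count (ks : Multiset Int) w).symm

-- a fold 'score += g(x)' is the sum of g over the list
lemma pv_foldl_add {α : Type} (g : α → Int) (l : List α) (s : Int) :
    l.foldl (fun a x => a + g x) s = s + (l.map g).sum := by
  induction l generalizing s with
  | nil => simp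
  | cons x t ih => simp only [List.foldl_cons, List.map_cons, List.sum_cons, ih]; ring

theorem end_round_spec : Claim_equal_end_round := by
  intro h _
  unfold Spec_end_round end_round end_round_alt
  simp only []
  rw [pv_counter_items h,
      List.foldl_map (f := fun k => (k, (((h.map Prod.fst).count k : Int))))
        (g := fun score kc => score + kc.2 * (if kc.1 == 13 then (10:Int) else 1))]
  have hfun : (fun (score : Int) (c : Int × String) =>
      if c.1 == 13 then score + 10 else score + 1)
      = (fun score c => score + (if c.1 == 13 then (10:Int) else 1)) := by
    funext s c; by_cases hc : c.1 == 13 <;> simp [hc]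
  rw [hfun]
  refine (pv_foldl_add (fun c : Int × String => if c.1 == 13 then (10:Int) else 1) h 0).trans
    (Eq.trans ?_
      (pv_foldl_add
        (fun k : Int => ((h.map Prod.fst).count k : Int) * (if k == 13 then (10:Int) else 1))
        (PySem.Set.ofList (h.map Prod.fst)) 0).symm)
  simp only [zero_add]
  have hs := pv_sum_count (h.map Prod.fst) (fun k => if k == 13 then (10:Int) else 1)
  rw [List.map_map] at hs
  exact hs.symm
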